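-- pv_equiv track=rewrite | github.com/slovb/aoc_2023 | 02/first.py | maxes
-- ===== SOURCE A (Python) =====
-- def maxes(game):
--     r = g = b = 0
--     for subset in game:
--         for count, color in subset:
--             if color == "red":
--                 r = max(r, count)
--             elif color == "green":
--                 g = max(g, count)
--             elif color == "blue":
--                 b = max(b, count)
--             else:
--                 raise SystemError("COLOR")
--     return (r, g, b)
-- ===== SOURCE B (Python) =====
-- def maxes(game):
--     for subset in game:
--         for count, color in subset:
--             if color not in ("red", "green", "blue"):
--                 raise SystemError("COLOR")
--     flat = [pair for subset in game for pair in subset]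
--     r = max(0, max((c for c, col in flat if col == "red"), default=0))
--     g = max(0, max((c for c, col in flat if col == "green"), default=0))
--     b = max(0, max((c for c, col in flat if col == "blue"), default=0))
--     return (r, g, b)
-- ===== Notes on version B (the rewrite author's own statement) =====
-- stated objective: alternative
-- what changed: Replaces the single branch-dispatch loop over three scalar accumulators with a validation pass followed by three independent per-color filtered max reductions over the flattened game.
import Mathlib
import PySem

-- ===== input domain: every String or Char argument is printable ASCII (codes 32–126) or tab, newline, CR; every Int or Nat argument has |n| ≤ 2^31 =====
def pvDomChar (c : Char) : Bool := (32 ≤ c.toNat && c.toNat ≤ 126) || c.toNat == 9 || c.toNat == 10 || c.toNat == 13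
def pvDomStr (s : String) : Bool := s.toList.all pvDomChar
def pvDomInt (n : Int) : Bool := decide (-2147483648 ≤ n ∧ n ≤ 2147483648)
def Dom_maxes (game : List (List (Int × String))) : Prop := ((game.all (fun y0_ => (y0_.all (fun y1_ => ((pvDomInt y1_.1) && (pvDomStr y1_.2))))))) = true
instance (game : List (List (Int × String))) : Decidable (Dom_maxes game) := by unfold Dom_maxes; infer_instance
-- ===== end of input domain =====

-- B replaces A's branch-dispatch accumulator loop by a validation pass plus three
-- independent per-color filtered max reductions (alternative decomposition, same cost).


-- ===== PORT A =====
-- state 'none' marks the raise SystemError("COLOR") path (excluded by Pre_maxes)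
def maxesStep (st : Option (Int × Int × Int)) (p : Int × String) : Option (Int × Int × Int) :=
  match st with
  | none => none
  | some (r, g, b) =>
    if p.2 == "red" then some (max r p.1, g, b)
    else if p.2 == "green" then some (r, max g p.1, b)
    else if p.2 == "blue" then some (r, g, max b p.1)
    else none

def maxes (game : List (List (Int × String))) : Int × Int × Int :=
  -- the .getD is only reached on the raise path, which Pre_maxes excludes
  (game.foldl (fun st subset => subset.foldl maxesStep st) (some (0, 0, 0))).getD (0, 0, 0)

-- ===== PORT B =====
def validColor (p : Int × String) : Bool :=
  p.2 == "red" || p.2 == "green" || p.2 == "blue"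

-- max(0, max(counts of color c in flat, default=0))
def channelMax (flat : List (Int × String)) (c : String) : Int :=
  max 0 ((PySem.List.max? ((flat.filter (fun p => p.2 == c)).map Prod.fst) (fun x => x)).getD 0)

def maxes_alt (game : List (List (Int × String))) : Int × Int × Int :=
  if game.all (fun subset => subset.all validColor) then
    let flat := game.flatMap (fun subset => subset)
    (channelMax flat "red", channelMax flat "green", channelMax flat "blue")
  else (0, 0, 0)   -- Source B raises SystemError("COLOR") here; excluded by Pre_maxes

-- ===== PRECONDITION & SPEC =====
-- Pre_maxes excludes exactly the inputs containing a color other than red/green/blue,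
-- on which the Python A raises SystemError("COLOR").
def Pre_maxes (game : List (List (Int × String))) : Prop :=
  (game.all (fun subset => subset.all validColor)) = true
instance (game : List (List (Int × String))) : Decidable (Pre_maxes game) := by unfold Pre_maxes; infer_instance
def pvWitness_maxes : (List (List (Int × String))) := [[(3, "red"), (1, "blue")], [(2, "green"), (5, "red")]]

def Spec_maxes (game : List (List (Int × String))) (out : Int × Int × Int) : Prop := out = maxes_alt game
instance (game : List (List (Int × String))) (out : Int × Int × Int) : Decidable (Spec_maxes game out) := by unfold Spec_maxes; infer_instance

-- ===== CLAIM (what is proved, stated in full; the proofs are below) =====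
def Claim_equal_maxes : Prop := ∀ (game : List (List (Int × String))), Dom_maxes game → Pre_maxes game → Spec_maxes game (maxes game)

-- ===== LEMMAS AND PROOFS =====

-- A's nested loop is the loop over the flattened game
theorem foldl_nested_eq_flat (game : List (List (Int × String))) (st : Option (Int × Int × Int)) :
    game.foldl (fun st subset => subset.foldl maxesStep st) st
      = (game.flatMap (fun subset => subset)).foldl maxesStep st := by
  induction game generalizing st with
  | nil => rfl
  | cons s gs ih => simp [List.foldl_append, ih]

-- A's accumulator loop computes three independent filtered max folds
theorem foldl_maxesStep_eq (l : List (Int × String)) (r g b : Int)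
    (h : l.all validColor = true) :
    l.foldl maxesStep (some (r, g, b))
      = some (((l.filter (fun p => p.2 == "red")).map Prod.fst).foldl max r,
              ((l.filter (fun p => p.2 == "green")).map Prod.fst).foldl max g,
              ((l.filter (fun p => p.2 == "blue")).map Prod.fst).foldl max b) := by
  induction l generalizing r g b with
  | nil => rfl
  | cons p t ih =>
    simp only [List.all_cons, Bool.and_eq_true] at h
    obtain ⟨hv, ht⟩ := h
    by_cases h1 : p.2 = "red"
    · simp [List.foldl_cons, maxesStep, h1, ih _ _ _ ht]
    · by_cases h2 : p.2 = "green"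
      · simp [List.foldl_cons, maxesStep, h2, ih _ _ _ ht]
      · by_cases h3 : p.2 = "blue"
        · simp [List.foldl_cons, maxesStep, h3, ih _ _ _ ht]
        · unfold validColor at hv; simp [h1, h2, h3] at hv

theorem foldl_max_out (t : List Int) (a x : Int) :
    t.foldl max (max a x) = max a (t.foldl max x) := by
  induction t generalizing x with
  | nil => rfl
  | cons y t ih => simp [List.foldl_cons, max_assoc, ih]

-- B's channel expression is A's running-max fold from 0
theorem channelMax_eq_foldl (flat : List (Int × String)) (c : String) :
    channelMax flat c = ((flat.filter (fun p => p.2 == c)).map Prod.fst).foldl max 0 := by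
  unfold channelMax
  cases hxs : (flat.filter (fun p => p.2 == c)).map Prod.fst with
  | nil => simp [PySem.List.max?]
  | cons x t =>
    rw [PySem.List.max?_id_cons]
    simp only [Option.getD_some, List.foldl_cons]
    rw [show (max (0:Int) x) = max 0 x from rfl, foldl_max_out]

-- ===== VERDICT (by name: the statement is the Claim_ definition above) =====
theorem maxes_spec : Claim_equal_maxes := by
  intro game _ hpre
  unfold Spec_maxes maxes maxes_alt
  have hall : game.all (fun subset => subset.all validColor) = true := hpre
  rw [if_pos hall, foldl_nested_eq_flat]
  have hflat : (game.flatMap (fun subset => subset)).all validColor = true := by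
    simp only [List.all_eq_true] at hall ⊢
    intro p hp
    rcases List.mem_flatMap.1 hp with ⟨s, hs, hps⟩
    exact hall s hs p hps
  rw [foldl_maxesStep_eq _ 0 0 0 hflat]
  simp [channelMax_eq_foldl]
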